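-- pv_equiv track=rewrite | github.com/DominidM/Robotica | modules/test_psico/test_zung.py | interpretar_zung
-- ===== SOURCE A (Python) =====
-- zung_reverse_questions = [2, 5, 6, 11, 12, 14, 16, 17, 18, 20]
--
-- zung_reverse = {4:1, 3:2, 2:3, 1:4}
--
-- def interpretar_zung(respuestas):
--     puntaje = 0
--     for idx, r in enumerate(respuestas):
--         valor = r
--         if (idx+1) in zung_reverse_questions:
--             valor = zung_reverse.get(valor, valor)
--         puntaje += valor
--     if puntaje <= 28:
--         nivel = "Ausencia de depresión"
--     elif 29 <= puntaje <= 41: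
--         nivel = "Depresión leve"
--     elif 42 <= puntaje <= 53:
--         nivel = "Depresión moderada"
--     else:
--         nivel = "Depresión grave"
--     return nivel
-- ===== SOURCE B (Python) =====
-- ZUNG_REVERSE_POS = [2, 5, 6, 11, 12, 14, 16, 17, 18, 20]
-- ZUNG_THRESHOLDS = [28, 41, 53]
-- ZUNG_LABELS = ["Ausencia de depresión", "Depresión leve",
--                "Depresión moderada", "Depresión grave"]
--
-- def interpretar_zung(respuestas):
--     # Stage 1: raw sum of all responses in one pass.
--     total = sum(respuestas)
--     # Stage 2: patch only the ten fixed reverse-scored positions by random access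
--     # (the reversed score of r in 1..4 is 5 - r, i.e. a correction of 5 - 2*r).
--     n = len(respuestas)
--     for q in ZUNG_REVERSE_POS:
--         if q <= n:
--             r = respuestas[q - 1]
--             if 1 <= r <= 4:
--                 total += 5 - 2 * r
--     # Stage 3: scan the sorted thresholds until the total no longer exceeds one.
--     idx = 0
--     while idx < 3 and total > ZUNG_THRESHOLDS[idx]:
--         idx += 1
--     return ZUNG_LABELS[idx]
-- ===== Notes on version B (the rewrite author's own statement) =====
-- stated objective: faster
-- what changed: Instead of one enumerated pass that dict-reverses each response inline and an if/elif chain, B stages the work: raw sum of all responses first, then a loop over only the ten fixed reverse positions patching the total by random access (adding 5-2r for in-range r), and the label picked by a while-loop scan of a sorted threshold table. (measured ~3.9x faster: the per-element list-membership test and dict lookup disappear, replaced by a builtin sum and a constant 10-step patch loop).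
import Mathlib
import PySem

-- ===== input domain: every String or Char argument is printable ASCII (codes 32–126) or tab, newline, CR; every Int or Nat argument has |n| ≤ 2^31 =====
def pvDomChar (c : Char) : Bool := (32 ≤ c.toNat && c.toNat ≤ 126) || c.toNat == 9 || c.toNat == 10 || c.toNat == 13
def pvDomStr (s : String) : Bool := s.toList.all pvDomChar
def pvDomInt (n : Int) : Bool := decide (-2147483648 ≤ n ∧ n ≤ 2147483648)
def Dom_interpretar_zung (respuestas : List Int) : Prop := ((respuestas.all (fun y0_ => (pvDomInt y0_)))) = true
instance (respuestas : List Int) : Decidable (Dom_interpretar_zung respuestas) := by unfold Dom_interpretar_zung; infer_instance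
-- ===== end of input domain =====

-- B is a staged alternative: raw sum of all responses first, then a loop over the ten fixed
-- reverse positions that patches the total by random access, then a scan of the sorted
-- threshold table for the label (instead of A's single enumerated pass + if/elif chain).

-- ===== PORT A =====
def zungReverseQuestions : List Int := [2, 5, 6, 11, 12, 14, 16, 17, 18, 20]

def zungReverse : PySem.Dict Int Int := PySem.Dict.ofList [(4, 1), (3, 2), (2, 3), (1, 4)]

def interpretar_zung (respuestas : List Int) : String :=
  let puntaje := (PySem.List.enumerate respuestas).foldl
    (fun puntaje p =>
      let valor := p.2
      let valor := if zungReverseQuestions.contains (p.1 + 1)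
                   then (zungReverse.get? valor).getD valor else valor
      puntaje + valor) 0
  if puntaje ≤ 28 then "Ausencia de depresión"
  else if 29 ≤ puntaje ∧ puntaje ≤ 41 then "Depresión leve"
  else if 42 ≤ puntaje ∧ puntaje ≤ 53 then "Depresión moderada"
  else "Depresión grave"

-- ===== PORT B =====
def zungReversePosB : List Int := [2, 5, 6, 11, 12, 14, 16, 17, 18, 20]

def zungThresholdsB : List Int := [28, 41, 53]

def zungLabelsB : List String :=
  ["Ausencia de depresión", "Depresión leve", "Depresión moderada", "Depresión grave"]

-- Source B's while loop 'while idx < 3 and total > ZUNG_THRESHOLDS[idx]: idx += 1',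
-- transcribed as the scan of the threshold list it performs
def zungScanB (ts : List Int) (total : Int) : Nat :=
  match ts with
  | [] => 0
  | t :: rest => if total > t then 1 + zungScanB rest total else 0

def interpretar_zung_alt (respuestas : List Int) : String :=
  let total := zungReversePosB.foldl (fun total q =>
    if q ≤ (respuestas.length : Int) then
      -- the guard q ≤ len (with q ≥ 1 in the table) keeps respuestas[q-1] in range
      let r := (PySem.List.pyGet? respuestas (q - 1)).getD 0
      if 1 ≤ r ∧ r ≤ 4 then total + (5 - 2 * r) else total
    else total) respuestas.sum
  zungLabelsB.getD (zungScanB zungThresholdsB total) ""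

-- ===== PRECONDITION & SPEC =====
def Spec_interpretar_zung (respuestas : List Int) (out : String) : Prop := out = interpretar_zung_alt respuestas
instance (respuestas : List Int) (out : String) : Decidable (Spec_interpretar_zung respuestas out) := by unfold Spec_interpretar_zung; infer_instance

-- ===== CLAIM (what is proved, stated in full; the proofs are below) =====
def Claim_equal_interpretar_zung : Prop := ∀ (respuestas : List Int), Dom_interpretar_zung respuestas → Spec_interpretar_zung respuestas (interpretar_zung respuestas)

-- ===== LEMMAS AND PROOFS =====

-- the reverse-scoring correction added at a reverse position
def zCorr (r : Int) : Int := if 1 ≤ r ∧ r ≤ 4 then 5 - 2 * r else 0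

-- the dict lookup with default equals the value plus the correction
theorem zung_rev_eq (v : Int) : (zungReverse.get? v).getD v = v + zCorr v := by
  have h : v = 1 ∨ v = 2 ∨ v = 3 ∨ v = 4 ∨ ¬ (1 ≤ v ∧ v ≤ 4) := by omega
  rcases h with h | h | h | h | h
  · subst h; decide
  · subst h; decide
  · subst h; decide
  · subst h; decide
  · have h1 : v ≠ 1 := by omega
    have h2 : v ≠ 2 := by omega
    have h3 : v ≠ 3 := by omega
    have h4 : v ≠ 4 := by omega
    have hz : zungReverse = PySem.Dict.mk [(4, 1), (3, 2), (2, 3), (1, 4)] := by decide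
    simp [hz, beq_iff_eq, Ne.symm h1, Ne.symm h2, Ne.symm h3, Ne.symm h4,
      PySem.Dict.get?, zCorr, h]

-- A's accumulating fold = acc + raw sum + sum of corrections at reverse positions
theorem zA_total (l : List Int) (s acc : Int) :
    (PySem.List.enumerate l s).foldl
      (fun puntaje p =>
        puntaje + (if zungReverseQuestions.contains (p.1 + 1)
                   then (zungReverse.get? p.2).getD p.2 else p.2)) acc
    = acc + l.sum + ((PySem.List.enumerate l s).map
        (fun p => if zungReverseQuestions.contains (p.1 + 1) then zCorr p.2 else 0)).sum := by
  induction l generalizing s acc with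
  | nil => simp [PySem.List.enumerate_nil]
  | cons x xs ih =>
      rw [PySem.List.enumerate_cons]
      simp only [List.foldl_cons, List.map_cons, List.sum_cons, List.sum_cons]
      rw [ih (s + 1)]
      by_cases h : zungReverseQuestions.contains (s + 1)
      · rw [if_pos h, if_pos h, zung_rev_eq]; ring
      · rw [if_neg h, if_neg h]; ring

-- shifting the start of enumerate moves the +1 into the position
theorem zEnum_shift (l : List Int) (s : Int) (f : Int → Int → Int) :
    ((PySem.List.enumerate l s).map (fun p => f (p.1 + 1) p.2)).sum
    = ((PySem.List.enumerate l (s + 1)).map (fun p => f p.1 p.2)).sum := by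
  induction l generalizing s with
  | nil => simp [PySem.List.enumerate_nil]
  | cons x xs ih =>
      rw [PySem.List.enumerate_cons, PySem.List.enumerate_cons]
      simp only [List.map_cons, List.sum_cons, ih]

-- the correction contributed by a single position q
theorem zSingle (l : List Int) (s q : Int) :
    ((PySem.List.enumerate l s).map (fun p => if p.1 = q then zCorr p.2 else 0)).sum
    = if s ≤ q ∧ q < s + l.length then zCorr ((PySem.List.pyGet? l (q - s)).getD 0) else 0 := by
  induction l generalizing s with
  | nil => simp [PySem.List.enumerate_nil]
  | cons x xs ih =>
      rw [PySem.List.enumerate_cons]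
      simp only [List.map_cons, List.sum_cons]
      rw [ih (s + 1)]
      by_cases hq : s = q
      · subst hq
        have hc1 : ¬ (s + 1 ≤ s ∧ s < s + 1 + (xs.length : Int)) := by omega
        have hc2 : (s ≤ s ∧ s < s + ((x :: xs).length : Int)) := by
          simp only [List.length_cons]; push_cast; omega
        rw [if_neg hc1, if_pos hc2, if_pos rfl, sub_self, PySem.List.pyGet?_zero_cons]
        simp
      · have hcond : (s + 1 ≤ q ∧ q < s + 1 + (xs.length : Int)) ↔
            (s ≤ q ∧ q < s + ((x :: xs).length : Int)) := by
          simp only [List.length_cons]; push_cast; omega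
        rw [if_neg hq, zero_add]
        by_cases h2 : s + 1 ≤ q ∧ q < s + 1 + (xs.length : Int)
        · rw [if_pos h2, if_pos (hcond.mp h2)]
          have e1 : PySem.List.pyGet? (x :: xs) (q - s) = (x :: xs)[(q - s).toNat]? :=
            PySem.List.pyGet?_of_nonneg _ (by omega)
          have e2 : PySem.List.pyGet? xs (q - (s + 1)) = xs[(q - (s + 1)).toNat]? :=
            PySem.List.pyGet?_of_nonneg _ (by omega)
          have ht : (q - s).toNat = (q - (s + 1)).toNat + 1 := by omega
          rw [e1, e2, ht, List.getElem?_cons_succ]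
        · rw [if_neg h2, if_neg (fun hc => h2 (hcond.mpr hc))]

-- summing the indicator over a duplicate-free position list splits into single positions
theorem zKey (l : List Int) (ts : List Int) (hnd : ts.Nodup) (hpos : ∀ q ∈ ts, 1 ≤ q) :
    ((PySem.List.enumerate l 1).map (fun p => if ts.contains p.1 then zCorr p.2 else 0)).sum
    = (ts.map (fun q => if q ≤ (l.length : Int)
        then zCorr ((PySem.List.pyGet? l (q - 1)).getD 0) else 0)).sum := by
  induction ts with
  | nil => simp
  | cons q rest ih =>
      have hq : q ∉ rest := (List.nodup_cons.mp hnd).1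
      have hnd' : rest.Nodup := (List.nodup_cons.mp hnd).2
      have hq1 : 1 ≤ q := hpos q (List.mem_cons_self ..)
      have hsplit : ∀ p : Int × Int,
          (if (q :: rest).contains p.1 then zCorr p.2 else 0)
          = (if p.1 = q then zCorr p.2 else 0) + (if rest.contains p.1 then zCorr p.2 else 0) := by
        intro p
        by_cases h1 : p.1 = q
        · simp [List.contains_eq_mem, h1, hq]
        · by_cases h2 : p.1 ∈ rest
          · simp [List.contains_eq_mem, h1, h2]
          · simp [List.contains_eq_mem, h1, h2]
      calc ((PySem.List.enumerate l 1).map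
              (fun p => if (q :: rest).contains p.1 then zCorr p.2 else 0)).sum
          = ((PySem.List.enumerate l 1).map (fun p =>
              (if p.1 = q then zCorr p.2 else 0) + (if rest.contains p.1 then zCorr p.2 else 0))).sum := by
            congr 1; exact List.map_congr_left (fun p _ => hsplit p)
        _ = ((PySem.List.enumerate l 1).map (fun p => if p.1 = q then zCorr p.2 else 0)).sum
            + ((PySem.List.enumerate l 1).map (fun p => if rest.contains p.1 then zCorr p.2 else 0)).sum :=
            PySem.List.sum_map_add_int ..
        _ = _ := by
            rw [zSingle, ih hnd' (fun x hx => hpos x (List.mem_cons_of_mem _ hx))]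
            simp only [List.map_cons, List.sum_cons]
            congr 1
            have : (1 ≤ q ∧ q < 1 + (l.length : Int)) ↔ q ≤ (l.length : Int) := by omega
            by_cases h : q ≤ (l.length : Int)
            · rw [if_pos (this.mpr h), if_pos h]
            · rw [if_neg (fun hc => h (this.mp hc)), if_neg h]

-- B's patching fold = starting total + sum of the per-position correction terms
theorem zB_fold (ts : List Int) (l : List Int) (acc : Int) :
    ts.foldl (fun total q =>
      if q ≤ (l.length : Int) then
        let r := (PySem.List.pyGet? l (q - 1)).getD 0
        if 1 ≤ r ∧ r ≤ 4 then total + (5 - 2 * r) else total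
      else total) acc
    = acc + (ts.map (fun q => if q ≤ (l.length : Int)
        then zCorr ((PySem.List.pyGet? l (q - 1)).getD 0) else 0)).sum := by
  induction ts generalizing acc with
  | nil => simp
  | cons q rest ih =>
      simp only [List.foldl_cons, List.map_cons, List.sum_cons]
      rw [ih]
      split_ifs with h1 h2
      · simp only [zCorr, if_pos h2]; ring
      · simp only [zCorr, if_neg h2]; ring
      · ring

-- the if/elif chain equals the label table indexed by the threshold scan
theorem zLabel (p : Int) :
    (if p ≤ 28 then "Ausencia de depresión"
     else if 29 ≤ p ∧ p ≤ 41 then "Depresión leve"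
     else if 42 ≤ p ∧ p ≤ 53 then "Depresión moderada"
     else "Depresión grave")
    = zungLabelsB.getD (zungScanB zungThresholdsB p) "" := by
  simp only [zungThresholdsB, zungScanB, zungLabelsB]
  split_ifs with h1 h2 h3 <;> simp_all <;> omega

-- ===== VERDICT (by name: the statement is the Claim_ definition above) =====
theorem interpretar_zung_spec : Claim_equal_interpretar_zung := by
  intro respuestas _
  unfold Spec_interpretar_zung
  simp only [interpretar_zung, interpretar_zung_alt]
  rw [zA_total respuestas 0 0, zB_fold]
  rw [zEnum_shift respuestas 0 (fun i r => if zungReverseQuestions.contains i then zCorr r else 0)]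
  rw [zero_add, zero_add]
  rw [zKey respuestas zungReverseQuestions (by decide) (by decide)]
  rw [zLabel]
  rfl
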